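-- pv_equiv track=rewrite | github.com/baiango/Minechunk | renderer.py | _profile_hotspot_label
-- ===== SOURCE A (Python) =====
-- def _profile_hotspot_label(entries) -> str:
--     if not entries:
--         return ""
--
--     hot_funcs = [entry[0][2] for entry in entries[:6]]
--     if any(name in {"_submit_render", "get_current_texture", "_get_current_texture"} for name in hot_funcs):
--         return "render submit bottleneck"
--     if any(
--         name in {
--             "surface_profile_at",
--             "chunk_surface_grids",
--             "chunk_voxel_grid",
--             "fill_chunk_surface_grids",
--             "fill_chunk_voxel_grid",
--             "count_chunk_voxel_vertices",
--             "build_chunk_vertex_array",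
--             "build_chunk_vertex_array_from_voxels",
--             "_build_chunk_vertex_bytes",
--             "_gpu_make_chunk_mesh_from_voxels",
--         }
--         or "build_chunk_vertex" in name
--         or "vertex_buffer" in name
--         for name in hot_funcs
--     ):
--         return "chunk vertex bottleneck"
--     if any(name in {"_prepare_chunks", "_ensure_chunk_mesh", "_make_chunk_mesh"} for name in hot_funcs):
--         return "chunk meshing bottleneck"
--     return ""
-- ===== SOURCE B (Python) =====
-- _SUBMIT = {"_submit_render", "get_current_texture", "_get_current_texture"}
-- _VERTEX = {
--     "surface_profile_at",
--     "chunk_surface_grids",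
--     "chunk_voxel_grid",
--     "fill_chunk_surface_grids",
--     "fill_chunk_voxel_grid",
--     "count_chunk_voxel_vertices",
--     "build_chunk_vertex_array",
--     "build_chunk_vertex_array_from_voxels",
--     "_build_chunk_vertex_bytes",
--     "_gpu_make_chunk_mesh_from_voxels",
-- }
-- _MESH = {"_prepare_chunks", "_ensure_chunk_mesh", "_make_chunk_mesh"}
-- _LABELS = ("render submit bottleneck", "chunk vertex bottleneck", "chunk meshing bottleneck", "")
--
--
-- def _profile_hotspot_label(entries) -> str:
--     if not entries:
--         return ""
--     best = 3
--     for entry in entries[:6]: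
--         name = entry[0][2]
--         if name in _SUBMIT:
--             level = 0
--         elif name in _VERTEX or "build_chunk_vertex" in name or "vertex_buffer" in name:
--             level = 1
--         elif name in _MESH:
--             level = 2
--         else:
--             level = 3
--         if level < best:
--             best = level
--     return _LABELS[best]
-- ===== Notes on version B (the rewrite author's own statement) =====
-- stated objective: alternative
-- what changed: Replaces A's three separate any()-scans over the hot-function names with a single pass that classifies each name into a priority level (0=submit, 1=vertex, 2=meshing, 3=none), keeps the minimum level seen, and maps it to the label at the end.
import Mathlib
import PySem

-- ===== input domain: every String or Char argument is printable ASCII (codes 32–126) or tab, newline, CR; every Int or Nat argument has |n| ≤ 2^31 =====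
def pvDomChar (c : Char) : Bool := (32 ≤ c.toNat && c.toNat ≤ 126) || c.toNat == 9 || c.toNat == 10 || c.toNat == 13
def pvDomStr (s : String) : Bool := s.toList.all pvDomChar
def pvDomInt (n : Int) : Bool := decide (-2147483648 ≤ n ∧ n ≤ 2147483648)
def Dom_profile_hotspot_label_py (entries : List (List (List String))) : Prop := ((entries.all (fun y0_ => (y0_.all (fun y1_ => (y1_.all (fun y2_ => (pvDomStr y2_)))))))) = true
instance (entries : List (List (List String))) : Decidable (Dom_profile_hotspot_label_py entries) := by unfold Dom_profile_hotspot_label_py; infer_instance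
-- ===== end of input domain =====

-- B replaces A's three separate any()-scans by ONE pass over the names that tracks the best
-- (lowest) priority level and maps it to a label at the end (objective: alternative decomposition).

-- entry[0][2]: exact on Pre_ (entry nonempty and entry[0] has ≥ 3 items); Python raises IndexError
-- outside, which Pre_ excludes.
def pvEntryName (e : List (List String)) : String := (e.headD []).getD 2 ""

-- ===== PORT A =====
-- entries[:6] with the literal nonnegative bound 6 is List.take 6.
def profile_hotspot_label_py (entries : List (List (List String))) : String :=
  if entries.isEmpty then ""
  else
    let hot_funcs := (entries.take 6).map pvEntryName
    if hot_funcs.any (fun name =>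
        ["_submit_render", "get_current_texture", "_get_current_texture"].contains name) then
      "render submit bottleneck"
    else if hot_funcs.any (fun name =>
        ["surface_profile_at", "chunk_surface_grids", "chunk_voxel_grid",
         "fill_chunk_surface_grids", "fill_chunk_voxel_grid", "count_chunk_voxel_vertices",
         "build_chunk_vertex_array", "build_chunk_vertex_array_from_voxels",
         "_build_chunk_vertex_bytes", "_gpu_make_chunk_mesh_from_voxels"].contains name
        || PySem.Str.isIn "build_chunk_vertex" name
        || PySem.Str.isIn "vertex_buffer" name) then
      "chunk vertex bottleneck"
    else if hot_funcs.any (fun name =>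
        ["_prepare_chunks", "_ensure_chunk_mesh", "_make_chunk_mesh"].contains name) then
      "chunk meshing bottleneck"
    else ""

-- ===== PORT B =====
def pvSUBMIT : List String := ["_submit_render", "get_current_texture", "_get_current_texture"]
def pvVERTEX : List String :=
  ["surface_profile_at", "chunk_surface_grids", "chunk_voxel_grid",
   "fill_chunk_surface_grids", "fill_chunk_voxel_grid", "count_chunk_voxel_vertices",
   "build_chunk_vertex_array", "build_chunk_vertex_array_from_voxels",
   "_build_chunk_vertex_bytes", "_gpu_make_chunk_mesh_from_voxels"]
def pvMESH : List String := ["_prepare_chunks", "_ensure_chunk_mesh", "_make_chunk_mesh"]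
def pvLABELS : List String :=
  ["render submit bottleneck", "chunk vertex bottleneck", "chunk meshing bottleneck", ""]

def pvLevel (name : String) : Nat :=
  if pvSUBMIT.contains name then 0
  else if pvVERTEX.contains name
       || PySem.Str.isIn "build_chunk_vertex" name
       || PySem.Str.isIn "vertex_buffer" name then 1
  else if pvMESH.contains name then 2
  else 3

def profile_hotspot_label_py_alt (entries : List (List (List String))) : String :=
  if entries.isEmpty then ""
  else
    let best := (entries.take 6).foldl
      (fun b e =>
        let lvl := pvLevel (pvEntryName e)
        if lvl < b then lvl else b) 3
    pvLABELS.getD best ""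

-- ===== PRECONDITION & SPEC =====
-- Pre_ excludes exactly the inputs on which Python A raises IndexError while extracting
-- entry[0][2] from one of the first six entries (empty entry, or entry[0] shorter than 3).
def Pre_profile_hotspot_label_py (entries : List (List (List String))) : Prop :=
  ∀ e ∈ entries.take 6, e ≠ [] ∧ 3 ≤ (e.headD []).length
instance (entries : List (List (List String))) : Decidable (Pre_profile_hotspot_label_py entries) := by unfold Pre_profile_hotspot_label_py; infer_instance
def pvWitness_profile_hotspot_label_py : List (List (List String)) :=
  [[["renderer.py", "120", "_submit_render"]], [["renderer.py", "33", "foo"]]]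

def Spec_profile_hotspot_label_py (entries : List (List (List String))) (out : String) : Prop := out = profile_hotspot_label_py_alt entries
instance (entries : List (List (List String))) (out : String) : Decidable (Spec_profile_hotspot_label_py entries out) := by unfold Spec_profile_hotspot_label_py; infer_instance

-- ===== CLAIM (what is proved, stated in full; the proofs are below) =====
def Claim_equal_profile_hotspot_label_py : Prop := ∀ (entries : List (List (List String))), Dom_profile_hotspot_label_py entries → Pre_profile_hotspot_label_py entries → Spec_profile_hotspot_label_py entries (profile_hotspot_label_py entries)

-- ===== LEMMAS AND PROOFS =====

theorem pvWitness_ok :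
    Dom_profile_hotspot_label_py pvWitness_profile_hotspot_label_py ∧
    Pre_profile_hotspot_label_py pvWitness_profile_hotspot_label_py := by
  constructor <;> decide

-- the levelled step of B's fold, and its minimum characterisation
def pvStep (b : Nat) (e : List (List String)) : Nat :=
  if pvLevel (pvEntryName e) < b then pvLevel (pvEntryName e) else b

def pvBest (l : List (List (List String))) : Nat := l.foldl pvStep 3

theorem pvLevel_le3 (n : String) : pvLevel n ≤ 3 := by
  unfold pvLevel; split_ifs <;> omega

theorem pvBest_fold (l : List (List (List String))) :
    ∀ b : Nat, b ≤ 3 → l.foldl pvStep b = min b (pvBest l) := by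
  induction l with
  | nil => intro b hb; simp [pvBest]; omega
  | cons x xs ih =>
    intro b hb
    have hgx := pvLevel_le3 (pvEntryName x)
    have h1 : pvStep b x ≤ 3 := by unfold pvStep; split_ifs <;> omega
    have h2 : pvStep 3 x ≤ 3 := by unfold pvStep; split_ifs <;> omega
    have e1 : (x :: xs).foldl pvStep b = xs.foldl pvStep (pvStep b x) := rfl
    have e2 : pvBest (x :: xs) = xs.foldl pvStep (pvStep 3 x) := rfl
    rw [e1, e2, ih _ h1, ih _ h2]
    unfold pvStep
    split_ifs <;> omega

theorem pvBest_le3 (l : List (List (List String))) : pvBest l ≤ 3 := by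
  have := pvBest_fold l 3 (le_refl 3)
  unfold pvBest at *; omega

theorem pvBest_le_of_mem (l : List (List (List String))) (e : List (List String))
    (he : e ∈ l) : pvBest l ≤ pvLevel (pvEntryName e) := by
  induction l with
  | nil => cases he
  | cons x xs ih =>
    have h2 : pvStep 3 x ≤ 3 := by unfold pvStep; split_ifs <;> omega
    have e2 : pvBest (x :: xs) = xs.foldl pvStep (pvStep 3 x) := rfl
    rw [e2, pvBest_fold xs _ h2]
    rcases List.mem_cons.1 he with he | he
    · subst he
      have : pvStep 3 e ≤ pvLevel (pvEntryName e) := by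
        unfold pvStep; split_ifs <;> omega
      omega
    · have := ih he; omega

theorem pvBest_exists (l : List (List (List String))) :
    pvBest l = 3 ∨ ∃ e ∈ l, pvLevel (pvEntryName e) = pvBest l := by
  induction l with
  | nil => exact Or.inl rfl
  | cons x xs ih =>
    have hgx := pvLevel_le3 (pvEntryName x)
    have h2 : pvStep 3 x ≤ 3 := by unfold pvStep; split_ifs <;> omega
    have e2 : pvBest (x :: xs) = xs.foldl pvStep (pvStep 3 x) := rfl
    have hstep : pvStep 3 x = pvLevel (pvEntryName x) := by
      unfold pvStep; split_ifs <;> omega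
    rw [e2, pvBest_fold xs _ h2, hstep]
    by_cases hle : pvLevel (pvEntryName x) ≤ pvBest xs
    · right; exact ⟨x, List.mem_cons_self, by omega⟩
    · rcases ih with h3 | ⟨e, he, heq⟩
      · omega
      · right; exact ⟨e, List.mem_cons_of_mem _ he, by omega⟩

-- pointwise facts relating pvLevel to A's three membership tests
theorem pvLevel_eq_zero_iff (n : String) :
    pvLevel n = 0 ↔ pvSUBMIT.contains n = true := by
  unfold pvLevel; split_ifs <;> simp_all

theorem pvLevel_eq_one (n : String) (h : pvLevel n = 1) :
    (pvVERTEX.contains n || PySem.Str.isIn "build_chunk_vertex" n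
      || PySem.Str.isIn "vertex_buffer" n) = true := by
  unfold pvLevel at h; split_ifs at h <;> simp_all

theorem pvLevel_le_one (n : String)
    (h : (pvVERTEX.contains n || PySem.Str.isIn "build_chunk_vertex" n
      || PySem.Str.isIn "vertex_buffer" n) = true) : pvLevel n ≤ 1 := by
  unfold pvLevel; split_ifs <;> simp_all

theorem pvLevel_eq_two (n : String) (h : pvLevel n = 2) : pvMESH.contains n = true := by
  unfold pvLevel at h; split_ifs at h <;> simp_all

theorem pvLevel_le_two (n : String) (h : pvMESH.contains n = true) : pvLevel n ≤ 2 := by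
  unfold pvLevel; split_ifs <;> simp_all

-- the core list-level equivalence: A's if-chain over the mapped names equals B's label lookup
theorem pvChain_eq (l : List (List (List String))) :
    (if (l.map pvEntryName).any (fun name => pvSUBMIT.contains name) then
      "render submit bottleneck"
    else if (l.map pvEntryName).any (fun name =>
        pvVERTEX.contains name || PySem.Str.isIn "build_chunk_vertex" name
          || PySem.Str.isIn "vertex_buffer" name) then
      "chunk vertex bottleneck"
    else if (l.map pvEntryName).any (fun name => pvMESH.contains name) then
      "chunk meshing bottleneck"
    else "") = pvLABELS.getD (pvBest l) "" := by
  have hle := pvBest_le3 l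
  have ha0 : pvBest l = 0 → (l.map pvEntryName).any (fun name => pvSUBMIT.contains name) = true := by
    intro h
    rcases pvBest_exists l with h3 | ⟨e, he, heq⟩
    · omega
    · simp only [List.any_map, List.any_eq_true]
      exact ⟨e, he, (pvLevel_eq_zero_iff _).1 (by omega)⟩
  have hn0 : pvBest l ≠ 0 → (l.map pvEntryName).any (fun name => pvSUBMIT.contains name) = false := by
    intro h
    simp only [List.any_map, List.any_eq_false]
    intro e he hc
    have := pvBest_le_of_mem l e he
    have := (pvLevel_eq_zero_iff (pvEntryName e)).2 (by simpa using hc)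
    omega
  have ha1 : pvBest l = 1 → (l.map pvEntryName).any (fun name =>
      pvVERTEX.contains name || PySem.Str.isIn "build_chunk_vertex" name
        || PySem.Str.isIn "vertex_buffer" name) = true := by
    intro h
    rcases pvBest_exists l with h3 | ⟨e, he, heq⟩
    · omega
    · simp only [List.any_map, List.any_eq_true]
      exact ⟨e, he, pvLevel_eq_one _ (by omega)⟩
  have hn1 : 1 < pvBest l → (l.map pvEntryName).any (fun name =>
      pvVERTEX.contains name || PySem.Str.isIn "build_chunk_vertex" name
        || PySem.Str.isIn "vertex_buffer" name) = false := by
    intro h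
    simp only [List.any_map, List.any_eq_false]
    intro e he hc
    have := pvBest_le_of_mem l e he
    have := pvLevel_le_one (pvEntryName e) (by simpa using hc)
    omega
  have ha2 : pvBest l = 2 → (l.map pvEntryName).any (fun name => pvMESH.contains name) = true := by
    intro h
    rcases pvBest_exists l with h3 | ⟨e, he, heq⟩
    · omega
    · simp only [List.any_map, List.any_eq_true]
      exact ⟨e, he, pvLevel_eq_two _ (by omega)⟩
  have hn2 : 2 < pvBest l → (l.map pvEntryName).any (fun name => pvMESH.contains name) = false := by
    intro h
    simp only [List.any_map, List.any_eq_false]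
    intro e he hc
    have := pvBest_le_of_mem l e he
    have := pvLevel_le_two (pvEntryName e) (by simpa using hc)
    omega
  interval_cases h : pvBest l
  · rw [ha0 rfl]; rfl
  · rw [hn0 (by omega), ha1 rfl]; rfl
  · rw [hn0 (by omega), hn1 (by omega), ha2 rfl]; rfl
  · rw [hn0 (by omega), hn1 (by omega), hn2 (by omega)]; rfl

-- ===== VERDICT (by name: the statement is the Claim_ definition above) =====
theorem profile_hotspot_label_py_spec : Claim_equal_profile_hotspot_label_py := by
  intro entries _ _
  unfold Spec_profile_hotspot_label_py profile_hotspot_label_py profile_hotspot_label_py_alt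
  by_cases h : entries.isEmpty
  · simp [h]
  · simp only [h]
    have := pvChain_eq (entries.take 6)
    simpa [pvSUBMIT, pvVERTEX, pvMESH, pvBest] using this
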